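-- pv_equiv track=rewrite | github.com/tsuji29/Circuit_Simulator | _util.py | get_start_and_end_index_in_array
-- ===== SOURCE A (Python) =====
-- def get_start_and_end_index_in_array(arr_value):
--     arr_len = len(arr_value)
--     static_value =  arr_value[0]
--     start_index = 0
--     end_index =1
--     for i,value in enumerate(arr_value[1:]):
--         if value != static_value:
--             start_index = i
--             break
--     for i,value in enumerate(arr_value[::-1]):
--         if value != static_value:
--             end_index = arr_len - i + 1
--             break
--     return (max(0,start_index),min(end_index,arr_len))
-- ===== SOURCE B (Python) =====
-- def get_start_and_end_index_in_array(arr_value):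
--     static_value = arr_value[0]
--     start_index = 0
--     end_index = 1
--     seen = False
--     for p, value in enumerate(arr_value):
--         if p > 0 and value != static_value:
--             if not seen:
--                 start_index = p - 1
--                 seen = True
--             end_index = p + 2
--     return (start_index, min(end_index, len(arr_value)))
-- ===== Notes on version B (the rewrite author's own statement) =====
-- stated objective: simpler
-- what changed: Replaces A's two early-exit scans over slice copies (arr[1:] and the reversed copy arr[::-1]) with one forward pass over enumerate(arr) that records the first and last differing positions directly, making the max(0, ...) clamp and the reverse-index arithmetic unnecessary.
import Mathlib
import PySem

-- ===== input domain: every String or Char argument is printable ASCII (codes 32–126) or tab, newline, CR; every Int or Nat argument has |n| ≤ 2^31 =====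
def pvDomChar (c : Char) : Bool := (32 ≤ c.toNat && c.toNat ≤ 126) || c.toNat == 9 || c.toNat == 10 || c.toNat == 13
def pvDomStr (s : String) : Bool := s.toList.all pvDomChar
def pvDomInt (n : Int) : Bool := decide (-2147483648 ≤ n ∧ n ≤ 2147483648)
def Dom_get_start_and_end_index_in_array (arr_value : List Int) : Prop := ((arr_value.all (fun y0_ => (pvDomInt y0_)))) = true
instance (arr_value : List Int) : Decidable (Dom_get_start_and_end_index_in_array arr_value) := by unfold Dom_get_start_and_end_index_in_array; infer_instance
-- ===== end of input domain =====

-- B replaces A's two early-exit scans over slice copies with one forward pass over enumerate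
-- that records the first and last differing positions directly (objective: simpler).


-- ===== PORT A =====
-- the for-with-break over enumerate(xs, start=i): first index (counted from i) of an element ≠ s
def pvScanA (s : Int) : List Int → Int → Option Int
  | [], _ => none
  | v :: rest, i => if v ≠ s then some i else pvScanA s rest (i + 1)

def get_start_and_end_index_in_array (arr_value : List Int) : Int × Int :=
  let arr_len : Int := arr_value.length
  let static_value : Int := (PySem.List.pyGet? arr_value 0).getD 0   -- first element; IndexError on empty input is excluded by Pre_
  let start_index : Int :=
    match pvScanA static_value (PySem.List.slice arr_value (some 1) none) 0 with
    | some i => i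
    | none => 0
  let end_index : Int :=
    match pvScanA static_value ((PySem.List.slice? arr_value none none (-1)).getD []) 0 with
    | some i => arr_len - i + 1
    | none => 1
  (max 0 start_index, min end_index arr_len)

-- ===== PORT B =====
def get_start_and_end_index_in_array_alt (arr_value : List Int) : Int × Int :=
  let static_value : Int := (PySem.List.pyGet? arr_value 0).getD 0   -- first element; IndexError on empty input is excluded by Pre_
  let r :=
    (PySem.List.enumerate arr_value 0).foldl
      (fun (acc : Int × Int × Bool) pv =>
        if 0 < pv.1 ∧ pv.2 ≠ static_value then
          ((if acc.2.2 then acc.1 else pv.1 - 1), pv.1 + 2, true)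
        else acc)
      (0, 1, false)
  (r.1, min r.2.1 (arr_value.length : Int))

-- ===== PRECONDITION & SPEC =====
-- Pre_ excludes only the empty list, on which Python A raises IndexError when reading the first element (B raises there too).
def Pre_get_start_and_end_index_in_array (arr_value : List Int) : Prop := arr_value ≠ []
instance (arr_value : List Int) : Decidable (Pre_get_start_and_end_index_in_array arr_value) := by unfold Pre_get_start_and_end_index_in_array; infer_instance
def pvWitness_get_start_and_end_index_in_array : List Int := [1, 2, 2, 1]

def Spec_get_start_and_end_index_in_array (arr_value : List Int) (out : Int × Int) : Prop := out = get_start_and_end_index_in_array_alt arr_value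
instance (arr_value : List Int) (out : Int × Int) : Decidable (Spec_get_start_and_end_index_in_array arr_value out) := by unfold Spec_get_start_and_end_index_in_array; infer_instance

-- ===== CLAIM (what is proved, stated in full; the proofs are below) =====
def Claim_equal_get_start_and_end_index_in_array : Prop := ∀ (arr_value : List Int), Dom_get_start_and_end_index_in_array arr_value → Pre_get_start_and_end_index_in_array arr_value → Spec_get_start_and_end_index_in_array arr_value (get_start_and_end_index_in_array arr_value)

-- ===== LEMMAS AND PROOFS =====

-- index of the first element ≠ s
def pvFdi (s : Int) : List Int → Option Nat
  | [] => none
  | v :: t => if v ≠ s then some 0 else (pvFdi s t).map (· + 1)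

-- index of the last element ≠ s
def pvLdi (s : Int) : List Int → Option Nat
  | [] => none
  | v :: t =>
      match pvLdi s t with
      | some m => some (m + 1)
      | none => if v ≠ s then some 0 else none

theorem pvScanA_eq (s : Int) (l : List Int) (i : Int) :
    pvScanA s l i = (match pvFdi s l with
      | none => none
      | some k => some ((k : Int) + i)) := by
  induction l generalizing i with
  | nil => rfl
  | cons v t ih =>
      by_cases h : v = s
      · cases hf : pvFdi s t with
        | none => simp [pvScanA, pvFdi, h, ih, hf]
        | some k =>
            simp only [pvScanA, pvFdi, h, ne_eq, not_true_eq_false, if_false, ih (i + 1), hf,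
              Option.map_some, Option.some.injEq]
            push_cast; ring
      · simp [pvScanA, pvFdi, h]

theorem pvFdi_append (s : Int) (a b : List Int) :
    pvFdi s (a ++ b) =
      match pvFdi s a with
      | some k => some k
      | none => (pvFdi s b).map (· + a.length) := by
  induction a with
  | nil => simp [pvFdi]
  | cons v t ih =>
      simp only [List.cons_append, pvFdi]
      by_cases h : v = s
      · simp only [h, ne_eq, not_true_eq_false, if_false, ih]
        cases pvFdi s t with
        | some k => rfl
        | none =>
            cases pvFdi s b with
            | none => rfl
            | some k => simp; omega
      · simp [h]

theorem pvFdi_none_iff (s : Int) (l : List Int) :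
    pvFdi s l = none ↔ pvLdi s l = none := by
  induction l with
  | nil => simp [pvFdi, pvLdi]
  | cons v t ih =>
      by_cases h : v = s <;> cases hl : pvLdi s t <;> simp [pvFdi, pvLdi, h, hl, ih]

theorem pvLdi_lt_length (s : Int) (l : List Int) (m : Nat) (h : pvLdi s l = some m) :
    m < l.length := by
  induction l generalizing m with
  | nil => simp [pvLdi] at h
  | cons v t ih =>
      simp only [pvLdi] at h
      cases hl : pvLdi s t with
      | some m' =>
          rw [hl] at h
          have := ih m' hl
          simp only [Option.some.injEq] at h
          simp; omega
      | none =>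
          rw [hl] at h
          by_cases hv : v = s
          · simp [hv] at h
          · simp only [hv, ne_eq, not_false_eq_true, if_true, Option.some.injEq] at h
            subst h; simp

theorem pvFdi_reverse (s : Int) (l : List Int) :
    pvFdi s l.reverse = (pvLdi s l).map (fun m => l.length - 1 - m) := by
  induction l with
  | nil => rfl
  | cons v t ih =>
      rw [List.reverse_cons, pvFdi_append, ih]
      simp only [pvLdi]
      cases hl : pvLdi s t with
      | some m =>
          simp only [Option.map_some, List.length_cons]
          congr 1; omega
      | none =>
          simp only [Option.map_none]
          by_cases hv : v = s
          · simp [hv, pvFdi]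
          · simp only [pvFdi, hv, ne_eq, not_false_eq_true, if_true, Option.map_some,
              List.length_reverse, List.length_cons]
            congr 1; omega

-- characterisation of B's fold over enumerate l i (indices all ≥ 1)
theorem pvFoldB_char (s : Int) (l : List Int) (i st en : Int) (seen : Bool) (hi : 1 ≤ i) :
    (PySem.List.enumerate l i).foldl
      (fun (acc : Int × Int × Bool) pv =>
        if 0 < pv.1 ∧ pv.2 ≠ s then
          ((if acc.2.2 then acc.1 else pv.1 - 1), pv.1 + 2, true)
        else acc)
      (st, en, seen) =
      (match pvFdi s l, pvLdi s l with
      | some k, some m => ((if seen then st else i + (k : Int) - 1), i + (m : Int) + 2, true)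
      | _, _ => (st, en, seen)) := by
  induction l generalizing i st en seen with
  | nil => rfl
  | cons v t ih =>
      rw [PySem.List.enumerate_cons, List.foldl_cons]
      by_cases hv : v = s
      · have hcond : ¬ (0 < i ∧ v ≠ s) := by simp [hv]
        rw [if_neg hcond, ih (i + 1) st en seen (by omega)]
        cases hf : pvFdi s t with
        | none =>
            have hl : pvLdi s t = none := (pvFdi_none_iff s t).mp hf
            simp [pvFdi, pvLdi, hv, hf, hl]
        | some k =>
            have hl : pvLdi s t ≠ none := fun hn =>
              (Option.some_ne_none k) (hf ▸ (pvFdi_none_iff s t).mpr hn)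
            cases hlm : pvLdi s t with
            | none => exact absurd hlm hl
            | some m =>
                simp only [hf, hlm, pvFdi, pvLdi, hv, ne_eq, not_true_eq_false, if_false,
                  Option.map_some]
                refine Prod.ext ?_ (Prod.ext ?_ rfl)
                · by_cases hs : seen <;> simp [hs] <;> omega
                · simp only []; omega
      · have hcond : (0 < i ∧ v ≠ s) := ⟨by omega, hv⟩
        rw [if_pos hcond, ih (i + 1) _ _ true (by omega)]
        cases hlm : pvLdi s t with
        | none =>
            have hf : pvFdi s t = none := (pvFdi_none_iff s t).mpr hlm
            simp [pvFdi, pvLdi, hv, hf, hlm]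
        | some m =>
            have hf : pvFdi s t ≠ none := fun hn =>
              (Option.some_ne_none m) (hlm ▸ (pvFdi_none_iff s t).mp hn)
            cases hfk : pvFdi s t with
            | none => exact absurd hfk hf
            | some k =>
                simp only [hfk, hlm, pvFdi, pvLdi, hv, ne_eq, not_false_eq_true, if_true]
                refine Prod.ext ?_ (Prod.ext ?_ rfl)
                · simp
                · simp; omega

-- ===== VERDICT (by name: the statement is the Claim_ definition above) =====
theorem get_start_and_end_index_in_array_spec : Claim_equal_get_start_and_end_index_in_array := by
  intro arr _ hpre
  unfold Spec_get_start_and_end_index_in_array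
  obtain ⟨s, rest, rfl⟩ : ∃ s rest, arr = s :: rest := by
    cases arr with
    | nil => exact absurd rfl hpre
    | cons a t => exact ⟨a, t, rfl⟩
  unfold get_start_and_end_index_in_array get_start_and_end_index_in_array_alt
  have hget : (PySem.List.pyGet? (s :: rest) 0).getD 0 = s := by
    simp [PySem.List.pyGet?, PySem.List.pyIdx?]
  rw [hget, PySem.List.slice_from_one, PySem.List.slice?_none_none_neg_one]
  simp only [List.tail_cons, Option.getD_some]
  have hrev : pvFdi s ((s :: rest).reverse) =
      (pvLdi s rest).map (fun m => rest.length - 1 - m) := by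
    rw [List.reverse_cons, pvFdi_append, pvFdi_reverse]
    cases hl : pvLdi s rest with
    | none => simp [pvFdi]
    | some m => simp
  rw [PySem.List.enumerate_cons, List.foldl_cons, if_neg (by simp), pvScanA_eq, pvScanA_eq,
    hrev, pvFoldB_char s rest (0 + 1) 0 1 false (by omega)]
  cases hf : pvFdi s rest with
  | none =>
      have hl : pvLdi s rest = none := (pvFdi_none_iff s rest).mp hf
      simp [hl]
  | some k =>
      have hl : pvLdi s rest ≠ none := fun hn =>
        (Option.some_ne_none k) (hf ▸ (pvFdi_none_iff s rest).mpr hn)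
      cases hlm : pvLdi s rest with
      | none => exact absurd hlm hl
      | some m =>
          have hm := pvLdi_lt_length s rest m hlm
          simp only [Option.map_some, List.length_cons]
          refine Prod.ext ?_ ?_
          · simp
          · simp; omega
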